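-- pv_equiv track=rewrite | github.com/luhygenet/hyperon-miner | experiments/frequent-pattern-miner/conj-exp/main.py | parse_metta_structure
-- ===== SOURCE A (Python) =====
-- def parse_metta_structure(input_str):
--     """Convert a string like ($A $B $C) into a flat list ['$A', '$B', '$C']"""
--     elements = []
--     current = ""
--     in_word = False
--
--     for char in input_str:
--         if char == "(":
--             continue
--         elif char == ")":
--             if in_word:
--                 elements.append(current.strip())
--                 current = ""
--                 in_word = False
--         elif char.isspace():
--             if in_word:
--                 elements.append(current.strip())
--                 current = ""
--                 in_word = False
--         else:
--             current += char
--             in_word = True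
--
--     if in_word:
--         elements.append(current.strip())
--
--     return elements
-- ===== SOURCE B (Python) =====
-- def parse_metta_structure(input_str):
--     """Convert a string like ($A $B $C) into a flat list ['$A', '$B', '$C']"""
--     return input_str.replace("(", "").replace(")", " ").split()
-- ===== Notes on version B (the rewrite author's own statement) =====
-- stated objective: simpler
-- what changed: Replaced the character-by-character state machine (current buffer, in_word flag, flush-on-delimiter) with a three-call pipeline: delete the open parens, turn close parens into spaces, and let no-arg str.split() do the tokenization.
import Mathlib
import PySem

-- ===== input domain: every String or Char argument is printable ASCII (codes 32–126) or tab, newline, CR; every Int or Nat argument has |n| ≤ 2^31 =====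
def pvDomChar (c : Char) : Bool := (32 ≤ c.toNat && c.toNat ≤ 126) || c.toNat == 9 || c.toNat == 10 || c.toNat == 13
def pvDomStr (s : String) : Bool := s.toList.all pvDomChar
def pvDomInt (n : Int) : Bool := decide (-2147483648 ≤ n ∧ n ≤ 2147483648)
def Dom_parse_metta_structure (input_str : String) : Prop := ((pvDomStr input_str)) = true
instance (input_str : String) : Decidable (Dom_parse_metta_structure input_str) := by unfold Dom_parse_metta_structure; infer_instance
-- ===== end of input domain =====

-- B replaces A's character-by-character state machine by delete-'(' / ')'→space / split(): simpler.
-- Python's str accumulator `current` is modeled exactly as a List Char (String.ofList at append time).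

-- ===== PORT A =====
-- one loop iteration of A: state = (elements, current, in_word)
def pmsStep (st : List String × List Char × Bool) (c : Char) : List String × List Char × Bool :=
  if c = '(' then st
  else if c = ')' then
    if st.2.2 then (st.1 ++ [String.ofList (PySem.Chars.strip st.2.1)], [], false) else st
  else if PySem.Chars.isspace c then
    if st.2.2 then (st.1 ++ [String.ofList (PySem.Chars.strip st.2.1)], [], false) else st
  else (st.1, st.2.1 ++ [c], true)

def parse_metta_structure (input_str : String) : List String :=
  let st := input_str.toList.foldl pmsStep ([], [], false)
  if st.2.2 then st.1 ++ [String.ofList (PySem.Chars.strip st.2.1)] else st.1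

-- ===== PORT B =====
def parse_metta_structure_alt (input_str : String) : List String :=
  PySem.Str.split₀ (PySem.Str.replace (PySem.Str.replace input_str "(" "") ")" " ")

-- ===== PRECONDITION & SPEC =====
def Spec_parse_metta_structure (input_str : String) (out : List String) : Prop := out = parse_metta_structure_alt input_str
instance (input_str : String) (out : List String) : Decidable (Spec_parse_metta_structure input_str out) := by unfold Spec_parse_metta_structure; infer_instance

-- ===== CLAIM (what is proved, stated in full; the proofs are below) =====
def Claim_equal_parse_metta_structure : Prop := ∀ (input_str : String), Dom_parse_metta_structure input_str → Spec_parse_metta_structure input_str (parse_metta_structure input_str)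

-- ===== LEMMAS AND PROOFS =====

-- single-character replacement acts pointwise on the character list
theorem replace_go_single (x : Char) (ns : List Char) :
    ∀ (l : List Char) (fuel : Nat) (acc : List Char), l.length ≤ fuel →
      PySem.Chars.replace.go [x] ns fuel l acc
        = acc.reverse ++ l.flatMap (fun c => if c = x then ns else [c]) := by
  intro l
  induction l with
  | nil =>
      intro fuel acc _
      cases fuel <;> simp [PySem.Chars.replace.go]
  | cons c t ih =>
      intro fuel acc h
      cases fuel with
      | zero => simp at h
      | succ n =>
        have hlen : t.length ≤ n := by simpa using h
        by_cases hc : c = x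
        · subst hc
          have hp : [c].isPrefixOf (c :: t) = true := by simp [List.isPrefixOf]
          simp only [PySem.Chars.replace.go, hp, if_true, List.length_cons, List.length_nil,
            List.drop_succ_cons, List.drop_zero]
          rw [ih n (ns.reverse ++ acc) hlen]
          simp [List.flatMap_cons]
        · have hp : [x].isPrefixOf (c :: t) = false := by
            simp only [List.isPrefixOf, Bool.and_true]
            exact decide_eq_false (fun e => hc e.symm)
          simp only [PySem.Chars.replace.go, hp, Bool.false_eq_true, if_false]
          rw [ih n (c :: acc) hlen]
          simp [List.flatMap_cons, hc]

theorem replace_single (cs : List Char) (x : Char) (ns : List Char) :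
    PySem.Chars.replace cs [x] ns = cs.flatMap (fun c => if c = x then ns else [c]) := by
  simp [PySem.Chars.replace, replace_go_single x ns cs cs.length [] (le_refl _)]

theorem dropWhile_no_space (l : List Char) (h : ∀ c ∈ l, PySem.Chars.isspace c = false) :
    List.dropWhile PySem.Chars.isspace l = l := by
  cases l with
  | nil => rfl
  | cons a t => simp [h a (by simp)]

-- strip is the identity on words without whitespace
theorem strip_of_no_space (cur : List Char) (h : ∀ c ∈ cur, PySem.Chars.isspace c = false) :
    PySem.Chars.strip cur = cur := by
  unfold PySem.Chars.strip PySem.Chars.lstrip PySem.Chars.rstrip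
  rw [dropWhile_no_space _ h, dropWhile_no_space, List.reverse_reverse]
  intro c hc
  exact h c (by simpa using hc)

-- the pipeline's character rewriting: '(' deleted, ')' becomes a space, all else kept
def pmsG (c : Char) : List Char := if c = '(' then [] else if c = ')' then [' '] else [c]

-- main invariant: A's fold + final flush equals split₀.go run on the rewritten suffix
theorem pms_main (cs : List Char) :
    ∀ (cur : List Char) (acc : List (List Char)),
      (∀ c ∈ cur, PySem.Chars.isspace c = false) →
      (let st := cs.foldl pmsStep ((acc.reverse.map String.ofList), cur, !cur.isEmpty)
       if st.2.2 then st.1 ++ [String.ofList (PySem.Chars.strip st.2.1)] else st.1)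
        = (PySem.Chars.split₀.go (cs.flatMap pmsG) cur.reverse acc).map String.ofList := by
  induction cs with
  | nil =>
      intro cur acc hcur
      simp only [List.foldl_nil, List.flatMap_nil, PySem.Chars.split₀.go, List.isEmpty_reverse,
        List.reverse_reverse]
      cases cur with
      | nil => simp
      | cons c t => simp [strip_of_no_space _ hcur]
  | cons c cs ih =>
      intro cur acc hcur
      by_cases h1 : c = '('
      · subst h1
        simpa [pmsStep, pmsG] using ih cur acc hcur
      by_cases h2 : c = ')'
      · subst h2
        have hsp : PySem.Chars.isspace ' ' = true := by decide
        cases cur with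
        | nil =>
            simpa [pmsStep, pmsG, PySem.Chars.split₀.go, hsp] using ih [] acc (by simp)
        | cons d t =>
            have hstrip := strip_of_no_space _ hcur
            have H := ih [] ((d :: t) :: acc) (by simp)
            simp only [List.reverse_cons, List.map_append, List.map_cons, List.map_nil,
              List.isEmpty_nil, Bool.not_true, List.reverse_nil] at H ⊢
            simpa [pmsStep, pmsG, PySem.Chars.split₀.go, hsp, hstrip] using H
      by_cases h3 : PySem.Chars.isspace c = true
      · cases cur with
        | nil =>
            simpa [pmsStep, pmsG, h1, h2, h3, PySem.Chars.split₀.go] using ih [] acc (by simp)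
        | cons d t =>
            have hstrip := strip_of_no_space _ hcur
            have H := ih [] ((d :: t) :: acc) (by simp)
            simp only [List.reverse_cons, List.map_append, List.map_cons, List.map_nil,
              List.isEmpty_nil, Bool.not_true, List.reverse_nil] at H ⊢
            simpa [pmsStep, pmsG, h1, h2, h3, PySem.Chars.split₀.go, hstrip] using H
      · have h3' : PySem.Chars.isspace c = false := by simpa using h3
        have hgood : ∀ x ∈ cur ++ [c], PySem.Chars.isspace x = false := by
          intro x hx
          rcases List.mem_append.1 hx with hx | hx
          · exact hcur _ hx
          · simp at hx; subst hx; exact h3'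
        have H := ih (cur ++ [c]) acc hgood
        have hne : (!(cur ++ [c]).isEmpty) = true := by simp
        rw [hne] at H
        simp only [List.reverse_append, List.reverse_cons, List.reverse_nil, List.nil_append,
          List.singleton_append] at H
        simpa [pmsStep, pmsG, h1, h2, h3', PySem.Chars.split₀.go] using H

theorem pms_eq (input_str : String) :
    parse_metta_structure input_str = parse_metta_structure_alt input_str := by
  have hsplit : parse_metta_structure_alt input_str
      = (PySem.Chars.split₀ (input_str.toList.flatMap pmsG)).map String.ofList := by
    unfold parse_metta_structure_alt
    have h1 : (PySem.Str.replace (PySem.Str.replace input_str "(" "") ")" " ").toList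
        = input_str.toList.flatMap pmsG := by
      rw [PySem.Str.toList_replace, PySem.Str.toList_replace]
      show PySem.Chars.replace (PySem.Chars.replace input_str.toList ['('] []) [')'] [' '] = _
      rw [replace_single, replace_single, List.flatMap_assoc]
      congr 1
      funext c
      by_cases hc1 : c = '(' <;> by_cases hc2 : c = ')' <;> simp [pmsG, hc1, hc2]
    have hid : String.ofList ∘ String.toList = id := funext fun s => String.ofList_toList (s := s)
    have h2 : PySem.Str.split₀ (PySem.Str.replace (PySem.Str.replace input_str "(" "") ")" " ")
        = (PySem.Chars.split₀ ((PySem.Str.replace (PySem.Str.replace input_str "(" "") ")" " ").toList)).map String.ofList := by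
      rw [← PySem.Str.split₀_map_toList, List.map_map, hid, List.map_id]
    rw [h2, h1]
  rw [hsplit]
  unfold parse_metta_structure
  have H := pms_main input_str.toList [] [] (by simp)
  simpa [PySem.Chars.split₀] using H

-- ===== VERDICT (by name: the statement is the Claim_ definition above) =====
theorem parse_metta_structure_spec : Claim_equal_parse_metta_structure := by
  intro s _
  exact pms_eq s
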